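-- pv_equiv track=rewrite | github.com/Hallyson34/uPython2 | cultivandostr.py | tamStr
-- ===== SOURCE A (Python) =====
-- def tamStr(v):
--     maior = 0
--     for i in range(len(v)):
--         j = 0
--         cont = 0
--         while j<len(v):
--             if (v[i] in v[j]) == True:
--                 cont +=1
--                 if cont > maior:
--                     maior = cont
--             else:
--                 cont = 0
--             j+=1
--     return maior
-- ===== SOURCE B (Python) =====
-- def tamStr(v):
--     best = 0
--     cur = 0
--     prev = None
--     for ch in v:
--         cur = cur + 1 if ch == prev else 1
--         prev = ch
--         if cur > best:
--             best = cur
--     return best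
-- ===== Notes on version B (the rewrite author's own statement) =====
-- stated objective: faster
-- what changed: Replaces A's quadratic double scan (for every index i, rescan the whole string counting runs of v[i]) with a single linear pass that tracks the length of the current run of identical adjacent characters and the running maximum.
import Mathlib
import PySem

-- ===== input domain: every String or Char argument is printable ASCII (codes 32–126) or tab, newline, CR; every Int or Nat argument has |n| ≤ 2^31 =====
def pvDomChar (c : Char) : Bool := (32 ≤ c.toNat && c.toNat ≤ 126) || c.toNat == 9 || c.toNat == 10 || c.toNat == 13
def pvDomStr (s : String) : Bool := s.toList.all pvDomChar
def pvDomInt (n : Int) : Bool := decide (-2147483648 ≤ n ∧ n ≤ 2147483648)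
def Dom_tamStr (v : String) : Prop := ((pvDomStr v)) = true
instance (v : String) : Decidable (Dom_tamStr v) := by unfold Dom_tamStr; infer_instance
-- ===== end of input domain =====

-- B replaces A's quadratic double scan by one linear pass over the string (runs of identical adjacent characters).

-- ===== PORT A =====
-- inner while loop of A: j scans the whole string, cont counts consecutive matches of c, maior is the running max
def tamStrInner (c : Char) : List Char → Int → Int → Int
  | [], _, maior => maior
  | x :: xs, cont, maior =>
    if x == c then
      tamStrInner c xs (cont + 1) (if cont + 1 > maior then cont + 1 else maior)
    else
      tamStrInner c xs 0 maior

def tamStr (v : String) : Int :=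
  v.toList.foldl (fun maior c => tamStrInner c v.toList 0 maior) 0

-- ===== PORT B =====
-- single pass: cur = length of run of identical characters ending here, best = running max
def tamStrAltLoop : List Char → Option Char → Int → Int → Int
  | [], _, _, best => best
  | ch :: rest, prev, cur, best =>
    let cur' := if some ch == prev then cur + 1 else 1
    tamStrAltLoop rest (some ch) cur' (if cur' > best then cur' else best)

def tamStr_alt (v : String) : Int :=
  tamStrAltLoop v.toList none 0 0

-- ===== PRECONDITION & SPEC =====
def Spec_tamStr (v : String) (out : Int) : Prop := out = tamStr_alt v
instance (v : String) (out : Int) : Decidable (Spec_tamStr v out) := by unfold Spec_tamStr; infer_instance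

-- ===== CLAIM (what is proved, stated in full; the proofs are below) =====
def Claim_equal_tamStr : Prop := ∀ (v : String), Dom_tamStr v → Spec_tamStr v (tamStr v)

-- ===== LEMMAS AND PROOFS =====

-- gi c cs cont: max (over prefixes of cs) of the consecutive-match counter for c, seeded with cont
def gi (c : Char) : List Char → Int → Int
  | [], _ => 0
  | x :: xs, cont => if x == c then max (cont + 1) (gi c xs (cont + 1)) else gi c xs 0

-- g cs prev cur: max (over positions of cs) of the identical-run counter, seeded with (prev, cur)
def g : List Char → Option Char → Int → Int
  | [], _, _ => 0
  | x :: xs, prev, cur =>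
    let cur' := if some x == prev then cur + 1 else 1
    max cur' (g xs (some x) cur')

-- MO cs: max (with 0) over characters c of cs of gi c cs 0
def MO (cs : List Char) : Int := (cs.map (fun c => gi c cs 0)).foldl max 0

theorem gm_le_foldl (ys : List Int) (m : Int) : m ≤ ys.foldl max m := by
  induction ys generalizing m with
  | nil => simp
  | cons y ys ih => exact le_trans (le_max_left m y) (ih (max m y))

theorem gm_mem_le_foldl (ys : List Int) : ∀ (m y : Int), y ∈ ys → y ≤ ys.foldl max m := by
  induction ys with
  | nil => intro m y hy; cases hy
  | cons z zs ih =>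
    intro m y hy
    rcases List.mem_cons.mp hy with h | h
    · subst h; exact le_trans (le_max_right m y) (gm_le_foldl zs (max m y))
    · exact ih (max m z) y h

theorem gm_foldl_le (ys : List Int) (m K : Int) (hm : m ≤ K) (h : ∀ y ∈ ys, y ≤ K) :
    ys.foldl max m ≤ K := by
  induction ys generalizing m with
  | nil => simpa using hm
  | cons y ys ih =>
    exact ih (max m y) (max_le hm (h y (List.mem_cons_self ..))) (fun z hz => h z (List.mem_cons_of_mem _ hz))

theorem gi_seed_mono (c : Char) (cs : List Char) (a b : Int) (hab : a ≤ b) :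
    gi c cs a ≤ gi c cs b := by
  induction cs generalizing a b with
  | nil => simp [gi]
  | cons x xs ih =>
    simp only [gi]
    split
    · exact max_le_max (by omega) (ih (a + 1) (b + 1) (by omega))
    · exact le_rfl

theorem gi_cons_mono (c x : Char) (xs : List Char) : gi c xs 0 ≤ gi c (x :: xs) 0 := by
  simp only [gi]
  split
  · exact le_trans (gi_seed_mono c xs 0 1 (by omega)) (le_max_right _ _)
  · exact le_rfl

theorem mo_mem_le (cs : List Char) (c : Char) (hc : c ∈ cs) : gi c cs 0 ≤ MO cs := by
  exact gm_mem_le_foldl _ 0 _ (List.mem_map.mpr ⟨c, hc, rfl⟩)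

theorem mo_nonneg (cs : List Char) : 0 ≤ MO cs := gm_le_foldl _ 0

theorem mo_cons_le (x : Char) (xs : List Char) : MO xs ≤ MO (x :: xs) := by
  apply gm_foldl_le _ 0 _ (mo_nonneg _)
  intro y hy
  rcases List.mem_map.mp hy with ⟨d, hd, rfl⟩
  exact le_trans (gi_cons_mono d x xs) (mo_mem_le (x :: xs) d (List.mem_cons_of_mem _ hd))

-- A's inner loop computes max maior (gi c cs cont)
theorem inner_eq (c : Char) (cs : List Char) (cont maior : Int) (h : 0 ≤ maior) :
    tamStrInner c cs cont maior = max maior (gi c cs cont) := by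
  induction cs generalizing cont maior with
  | nil => simp [tamStrInner, gi, max_eq_left h]
  | cons x xs ih =>
    simp only [tamStrInner, gi]
    split
    · rw [ih (cont + 1) _ (by omega)]
      by_cases hle : cont + 1 > maior
      · rw [if_pos hle]; omega
      · rw [if_neg hle]; omega
    · exact ih 0 maior h

-- B's loop computes max best (g cs prev cur)
theorem alt_eq (cs : List Char) (prev : Option Char) (cur best : Int) (h : 0 ≤ best) :
    tamStrAltLoop cs prev cur best = max best (g cs prev cur) := by
  induction cs generalizing prev cur best with
  | nil => simp [tamStrAltLoop, g, max_eq_left h]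
  | cons x xs ih =>
    simp only [tamStrAltLoop, g]
    set cur' := if some x == prev then cur + 1 else 1 with hcur'
    rw [ih (some x) cur' _ (by split <;> omega)]
    split <;> omega

-- A's outer fold equals MO
theorem outer_eq (l cs : List Char) (m : Int) (h : 0 ≤ m) :
    cs.foldl (fun maior c => tamStrInner c l 0 maior) m
      = (cs.map (fun c => gi c l 0)).foldl max m := by
  induction cs generalizing m with
  | nil => rfl
  | cons x xs ih =>
    simp only [List.foldl, List.map]
    rw [inner_eq x l 0 m h, ih (max m (gi x l 0)) (le_trans h (le_max_left _ _))]

-- each gi c cs 0 (any c) is bounded by g cs prev cur, for nonnegative seeds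
theorem gi_le_g (cs : List Char) (c : Char) (prev : Option Char) (cont cur : Int)
    (hcur : 0 ≤ cur) (hh : (prev = some c ∧ cont ≤ cur) ∨ cont = 0) :
    gi c cs cont ≤ g cs prev cur := by
  induction cs generalizing prev cont cur with
  | nil => simp [gi, g]
  | cons x xs ih =>
    simp only [gi, g]
    by_cases hx : x == c
    · rw [if_pos hx]
      by_cases hp : (some x == prev) = true
      · rw [if_pos hp]
        have hxc : x = c := by simpa using hx
        have hpx : prev = some x := by
          cases prev with
          | none => simp at hp
          | some p => simp at hp; simp [hp]
        rcases hh with ⟨hpc, hcc⟩ | hc0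
        · exact max_le_max (by omega)
            (ih (some x) (cont + 1) (cur + 1) (by omega) (Or.inl ⟨by simp [hxc], by omega⟩))
        · subst hc0
          exact max_le_max (by omega)
            (ih (some x) 1 (cur + 1) (by omega) (Or.inl ⟨by simp [hxc], by omega⟩))
      · rw [if_neg hp]
        have hxc : x = c := by simpa using hx
        have hcont0 : cont = 0 := by
          rcases hh with ⟨hpc, _⟩ | hc0
          · exfalso; apply hp; rw [hpc, hxc]; simp
          · exact hc0
        subst hcont0
        exact max_le_max (by omega)
          (ih (some x) 1 1 (by omega) (Or.inl ⟨by simp [hxc], le_rfl⟩))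
    · rw [if_neg hx]
      have hstep : gi c xs 0 ≤ g xs (some x) (if some x == prev then cur + 1 else 1) := by
        apply ih (some x) 0 _ _ (Or.inr rfl)
        split <;> omega
      exact le_trans hstep (le_max_right _ _)

-- g is bounded by MO (via the seed character's gi)
theorem g_le (cs : List Char) (c : Char) (cur : Int) :
    g cs (some c) cur ≤ max (gi c cs cur) (MO cs) := by
  induction cs generalizing c cur with
  | nil => simp [g, gi, MO]
  | cons x xs ih =>
    simp only [g]
    by_cases hx : (some x == some c) = true
    · rw [if_pos hx]
      have hxc : x = c := by simpa using hx
      subst hxc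
      have h1 : gi x (x :: xs) cur = max (cur + 1) (gi x xs (cur + 1)) := by
        simp [gi]
      have h2 := ih x (cur + 1)
      have h3 := mo_cons_le x xs
      apply max_le
      · rw [h1]; exact le_trans (le_max_left _ _) (le_max_left _ _)
      · apply le_trans h2
        apply max_le
        · rw [h1]; exact le_trans (le_max_right _ _) (le_max_left _ _)
        · exact le_trans h3 (le_max_right _ _)
    · rw [if_neg hx]
      have hgx : gi x (x :: xs) 0 = max 1 (gi x xs 1) := by simp [gi]
      have hmem : gi x (x :: xs) 0 ≤ MO (x :: xs) := mo_mem_le _ x (List.mem_cons_self ..)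
      have h2 := ih x 1
      apply max_le
      · have : (1 : Int) ≤ gi x (x :: xs) 0 := by rw [hgx]; exact le_max_left _ _
        exact le_trans (le_trans this hmem) (le_max_right _ _)
      · apply le_trans h2
        apply max_le
        · have : gi x xs 1 ≤ gi x (x :: xs) 0 := by rw [hgx]; exact le_max_right _ _
          exact le_trans (le_trans this hmem) (le_max_right _ _)
        · exact le_trans (mo_cons_le x xs) (le_max_right _ _)

theorem g_none_le (cs : List Char) : g cs none 0 ≤ MO cs := by
  cases cs with
  | nil => simp [g, MO]
  | cons x xs =>
    simp only [g]
    rw [if_neg (by simp)]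
    have hgx : gi x (x :: xs) 0 = max 1 (gi x xs 1) := by simp [gi]
    have hmem : gi x (x :: xs) 0 ≤ MO (x :: xs) := mo_mem_le _ x (List.mem_cons_self ..)
    have h2 := g_le xs x 1
    apply max_le
    · have : (1 : Int) ≤ gi x (x :: xs) 0 := by rw [hgx]; exact le_max_left _ _
      exact le_trans this hmem
    · apply le_trans h2
      apply max_le
      · have : gi x xs 1 ≤ gi x (x :: xs) 0 := by rw [hgx]; exact le_max_right _ _
        exact le_trans this hmem
      · exact mo_cons_le x xs

-- ===== VERDICT (by name: the statement is the Claim_ definition above) =====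
theorem tamStr_spec : Claim_equal_tamStr := by
  intro v _
  unfold Spec_tamStr tamStr tamStr_alt
  rw [outer_eq v.toList v.toList 0 le_rfl, alt_eq v.toList none 0 0 le_rfl]
  show MO v.toList = _
  apply le_antisymm
  · apply gm_foldl_le _ 0 _ (le_max_left _ _)
    intro y hy
    rcases List.mem_map.mp hy with ⟨c, hc, rfl⟩
    exact le_trans (gi_le_g v.toList c none 0 0 le_rfl (Or.inr rfl)) (le_max_right _ _)
  · exact max_le (mo_nonneg _) (g_none_le _)
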